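-- pv_equiv track=rewrite | github.com/hyohyo12/python_algorithm | baekjoon/19328_스타트_택시.py | find_customer
-- ===== SOURCE A (Python) =====
-- from collections import deque
--
-- dy = [-1,1,0,0]
--
-- dx = [0,0,-1,1]
--
-- def find_customer(depart:list[list[int]],n:int,cur_taxi:tuple[int],left_oil:int):
--     if depart[cur_taxi[0]][cur_taxi[1]]:
--         return (0,cur_taxi[0],cur_taxi[1])
--     visited = [[-1 for _ in range(n)] for _ in range(n)]
--     potential = []
--     q = deque()
--     q.append(cur_taxi)
--     visited[cur_taxi[0]][cur_taxi[1]] = 0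
--     while q:
--         y,x = q.popleft()
--         for i in range(4):
--             nx = x + dx[i];ny  = y + dy[i]
--             if 0 <= nx < n and 0 <= ny < n and not depart[ny][nx] == 1 and visited[ny][nx] == -1:
--                 visited[ny][nx] = visited[y][x] + 1
--                 if depart[ny][nx]:
--                     potential.append((visited[ny][nx],ny,nx))
--                 if visited[ny][nx] == left_oil:
--                     continue
--                 q.append((ny,nx))
--     if not potential:
--         return (-1,-1,-1)
--     potential.sort(key = lambda x:(x[0],x[1],x[2]))
--     return potential[0]
-- ===== SOURCE B (Python) =====
-- from collections import deque
--
-- dy = [-1, 1, 0, 0]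
-- dx = [0, 0, -1, 1]
--
--
-- def _bfs_distances(depart, n, cur_taxi, left_oil):
--     """Fill the distance grid by BFS from cur_taxi; cells at distance == left_oil
--     are recorded but not expanded (same reachability rule as the original)."""
--     visited = [[-1] * n for _ in range(n)]
--     visited[cur_taxi[0]][cur_taxi[1]] = 0
--     q = deque([cur_taxi])
--     while q:
--         y, x = q.popleft()
--         for i in range(4):
--             nx = x + dx[i]
--             ny = y + dy[i]
--             if 0 <= nx < n and 0 <= ny < n and depart[ny][nx] != 1 and visited[ny][nx] == -1:
--                 visited[ny][nx] = visited[y][x] + 1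
--                 if visited[ny][nx] != left_oil:
--                     q.append((ny, nx))
--     return visited
--
--
-- def find_customer(depart, n, cur_taxi, left_oil):
--     if depart[cur_taxi[0]][cur_taxi[1]]:
--         return (0, cur_taxi[0], cur_taxi[1])
--     visited = _bfs_distances(depart, n, cur_taxi, left_oil)
--     best = None
--     for y in range(n):
--         for x in range(n):
--             if visited[y][x] != -1 and depart[y][x] and (best is None or visited[y][x] < best[0]):
--                 best = (visited[y][x], y, x)
--     return best if best is not None else (-1, -1, -1)
-- ===== Notes on version B (the rewrite author's own statement) =====
-- stated objective: alternative
-- what changed: B splits the work into two phases: the BFS only fills the distance grid (no candidate list), and the best customer is then chosen by a row-major scan of the grid keeping the first cell with the smallest distance, instead of A's collecting (dist,y,x) triples during the BFS and sorting them to take the first.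
-- outside the precondition, e.g. on find_customer([[2, 4, 0], [4, 4, 4], [4, 2, 0]], 2, (0, -1), 2): A returns (1, 0, 0), B returns (0, 0, 1); on find_customer([[0, 5], [5, 5]], 1, (0, 0), 1): A returns (-1, -1, -1), B returns (-1, -1, -1); on find_customer([[0]], 1, (-1, 0), 1): A returns (-1, -1, -1), B returns (-1, -1, -1)
import Mathlib
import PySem

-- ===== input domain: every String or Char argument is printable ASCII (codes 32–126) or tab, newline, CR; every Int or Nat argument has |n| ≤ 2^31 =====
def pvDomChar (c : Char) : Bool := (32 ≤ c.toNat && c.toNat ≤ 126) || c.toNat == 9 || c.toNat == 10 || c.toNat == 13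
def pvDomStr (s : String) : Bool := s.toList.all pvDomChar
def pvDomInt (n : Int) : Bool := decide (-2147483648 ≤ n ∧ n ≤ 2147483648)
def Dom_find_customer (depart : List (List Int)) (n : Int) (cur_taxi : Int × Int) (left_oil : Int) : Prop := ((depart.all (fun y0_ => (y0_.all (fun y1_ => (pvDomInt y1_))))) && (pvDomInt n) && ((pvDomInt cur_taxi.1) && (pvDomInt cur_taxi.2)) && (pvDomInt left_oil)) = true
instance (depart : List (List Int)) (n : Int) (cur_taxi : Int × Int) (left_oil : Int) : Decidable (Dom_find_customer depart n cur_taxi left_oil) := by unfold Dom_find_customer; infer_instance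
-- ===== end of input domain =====

-- B replaces A's collect-candidates-during-BFS-then-sort by a BFS that only fills the
-- distance grid plus a row-major scan keeping the first cell of smallest distance
-- (objective: alternative decomposition; same asymptotic cost).

-- ===== PORT A =====
-- module constants dy, dx
def pvDyL : List Int := [-1, 1, 0, 0]
def pvDxL : List Int := [0, 0, -1, 1]
-- grid read v[y][x] / write v[y][x] = val (total forms; Pre_ keeps all indices in range)
def pvVget (v : List (List Int)) (y x : Int) : Int :=
  PySem.List.pyGetD (PySem.List.pyGetD v y []) x 0
def pvVset (v : List (List Int)) (y x val : Int) : List (List Int) :=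
  PySem.List.pySetD v y (PySem.List.pySetD (PySem.List.pyGetD v y []) x val)
-- Python tuple sort key (x[0], x[1], x[2]) = lexicographic order on the triple
def pvKey (t : Int × Int × Int) : Lex (Int × Lex (Int × Int)) :=
  toLex (t.1, toLex (t.2.1, t.2.2))

-- body of A's 'for i in range(4)' loop; state = (visited, potential, rest-of-queue)
def pvStepA (depart : List (List Int)) (n left_oil y x : Int)
    (st : List (List Int) × List (Int × Int × Int) × List (Int × Int)) (i : Int) :
    List (List Int) × List (Int × Int × Int) × List (Int × Int) :=
  let nx := x + PySem.List.pyGetD pvDxL i 0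
  let ny := y + PySem.List.pyGetD pvDyL i 0
  if 0 ≤ nx ∧ nx < n ∧ 0 ≤ ny ∧ ny < n ∧ ¬ pvVget depart ny nx = 1 ∧ pvVget st.1 ny nx = -1 then
    let d := pvVget st.1 y x + 1
    (pvVset st.1 ny nx d,
     (if pvVget depart ny nx ≠ 0 then st.2.1 ++ [(d, ny, nx)] else st.2.1),
     (if d = left_oil then st.2.2 else st.2.2 ++ [(ny, nx)]))
  else st

-- A's 'while q' loop (fuel n*n+1 bounds the number of pops: each cell is enqueued at most once)
def pvLoopA (depart : List (List Int)) (n left_oil : Int) :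
    Nat → List (List Int) × List (Int × Int × Int) × List (Int × Int) →
    List (List Int) × List (Int × Int × Int)
  | 0, st => (st.1, st.2.1)
  | Nat.succ f, st =>
    match st.2.2 with
    | [] => (st.1, st.2.1)
    | (y, x) :: qt =>
      pvLoopA depart n left_oil f
        ((PySem.List.pyRange 0 4 1).foldl (pvStepA depart n left_oil y x) (st.1, st.2.1, qt))

def find_customer (depart : List (List Int)) (n : Int) (cur_taxi : Int × Int) (left_oil : Int) : Int × Int × Int :=
  if pvVget depart cur_taxi.1 cur_taxi.2 ≠ 0 then (0, cur_taxi.1, cur_taxi.2)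
  else
    let visited0 := pvVset (List.replicate n.toNat (List.replicate n.toNat (-1))) cur_taxi.1 cur_taxi.2 0
    let r := pvLoopA depart n left_oil (n.toNat * n.toNat + 1) (visited0, [], [cur_taxi])
    if r.2 = [] then (-1, -1, -1)
    else PySem.List.pyGetD (PySem.List.sorted r.2 pvKey) 0 (-1, -1, -1)

-- ===== PORT B =====
-- body of B's inner loop in _bfs_distances; state = (visited, rest-of-queue)
def pvStepB (depart : List (List Int)) (n left_oil y x : Int)
    (st : List (List Int) × List (Int × Int)) (i : Int) :
    List (List Int) × List (Int × Int) :=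
  let nx := x + PySem.List.pyGetD pvDxL i 0
  let ny := y + PySem.List.pyGetD pvDyL i 0
  if 0 ≤ nx ∧ nx < n ∧ 0 ≤ ny ∧ ny < n ∧ ¬ pvVget depart ny nx = 1 ∧ pvVget st.1 ny nx = -1 then
    let d := pvVget st.1 y x + 1
    (pvVset st.1 ny nx d, if d ≠ left_oil then st.2 ++ [(ny, nx)] else st.2)
  else st

-- B's _bfs_distances 'while q' loop
def pvLoopB (depart : List (List Int)) (n left_oil : Int) :
    Nat → List (List Int) × List (Int × Int) → List (List Int)
  | 0, st => st.1
  | Nat.succ f, st =>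
    match st.2 with
    | [] => st.1
    | (y, x) :: qt =>
      pvLoopB depart n left_oil f
        ((PySem.List.pyRange 0 4 1).foldl (pvStepB depart n left_oil y x) (st.1, qt))

-- body of B's scan: keep the first cell with the smallest distance
def pvScanStep (depart v : List (List Int)) (b : Option (Int × Int × Int)) (yx : Int × Int) :
    Option (Int × Int × Int) :=
  let d := pvVget v yx.1 yx.2
  if d ≠ -1 ∧ pvVget depart yx.1 yx.2 ≠ 0 then
    match b with
    | none => some (d, yx.1, yx.2)
    | some t => if d < t.1 then some (d, yx.1, yx.2) else t
  else b

def find_customer_alt (depart : List (List Int)) (n : Int) (cur_taxi : Int × Int) (left_oil : Int) : Int × Int × Int :=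
  if pvVget depart cur_taxi.1 cur_taxi.2 ≠ 0 then (0, cur_taxi.1, cur_taxi.2)
  else
    let visited0 := pvVset (List.replicate n.toNat (List.replicate n.toNat (-1))) cur_taxi.1 cur_taxi.2 0
    let v := pvLoopB depart n left_oil (n.toNat * n.toNat + 1) (visited0, [cur_taxi])
    let best := (PySem.List.pyRange 0 n 1).foldl
      (fun b y => (PySem.List.pyRange 0 n 1).foldl (fun b x => pvScanStep depart v b (y, x)) b) none
    match best with
    | some t => t
    | none => (-1, -1, -1)

-- ===== PRECONDITION & SPEC =====
-- Pre_ admits every input whose start cell reads truthy under Python indexing (A and B both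
-- return (0,y,x) immediately there), and otherwise the natural domain: a well-formed n×n grid
-- with the taxi inside it; the excluded inputs either raise IndexError in the BFS or reach it
-- only through Python's negative-index wraparound / oversized-grid accident, where any value
-- either program returns is an artefact of those out-of-range reads.
def Pre_find_customer (depart : List (List Int)) (n : Int) (cur_taxi : Int × Int) (left_oil : Int) : Prop :=
  (((PySem.List.pyGet? depart cur_taxi.1).bind
      (fun row => PySem.List.pyGet? row cur_taxi.2)).getD 0 ≠ 0) ∨
  ((depart.length : Int) = n ∧ (∀ row ∈ depart, (row.length : Int) = n) ∧
   0 ≤ cur_taxi.1 ∧ cur_taxi.1 < n ∧ 0 ≤ cur_taxi.2 ∧ cur_taxi.2 < n)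
instance (depart : List (List Int)) (n : Int) (cur_taxi : Int × Int) (left_oil : Int) : Decidable (Pre_find_customer depart n cur_taxi left_oil) := by unfold Pre_find_customer; infer_instance

def pvWitness_find_customer : List (List Int) × Int × (Int × Int) × Int :=
  ([[0, 2], [0, 0]], 2, (0, 0), 3)

def Spec_find_customer (depart : List (List Int)) (n : Int) (cur_taxi : Int × Int) (left_oil : Int) (out : Int × Int × Int) : Prop := out = find_customer_alt depart n cur_taxi left_oil
instance (depart : List (List Int)) (n : Int) (cur_taxi : Int × Int) (left_oil : Int) (out : Int × Int × Int) : Decidable (Spec_find_customer depart n cur_taxi left_oil out) := by unfold Spec_find_customer; infer_instance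

-- ===== CLAIM (what is proved, stated in full; the proofs are below) =====
def Claim_equal_find_customer : Prop := ∀ (depart : List (List Int)) (n : Int) (cur_taxi : Int × Int) (left_oil : Int), Dom_find_customer depart n cur_taxi left_oil → Pre_find_customer depart n cur_taxi left_oil → Spec_find_customer depart n cur_taxi left_oil (find_customer depart n cur_taxi left_oil)

-- ===== LEMMAS AND PROOFS =====

-- ## grid infrastructure

def pvShape (v : List (List Int)) (n : Int) : Prop :=
  v.length = n.toNat ∧ ∀ row ∈ v, row.length = n.toNat

theorem pv_length_pySetD {α : Type} (xs : List α) (i : Int) (v : α) :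
    (PySem.List.pySetD xs i v).length = xs.length := by
  simp only [PySem.List.pySetD, PySem.List.pySet?]
  cases PySem.List.pyIdx? xs.length i <;> simp

theorem pv_mem_pySetD {α : Type} {xs : List α} {i : Int} {v r : α}
    (h : r ∈ PySem.List.pySetD xs i v) : r ∈ xs ∨ r = v := by
  simp only [PySem.List.pySetD, PySem.List.pySet?] at h
  cases hk : PySem.List.pyIdx? xs.length i
  · rw [hk] at h; simp at h; exact Or.inl h
  · rw [hk] at h; simp at h
    rcases List.mem_or_eq_of_mem_set h with h1 | h1
    · exact Or.inl h1
    · exact Or.inr h1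

theorem pv_row_mem {v : List (List Int)} {n y : Int} (h : pvShape v n)
    (hy0 : 0 ≤ y) (hy1 : y < n) : PySem.List.pyGetD v y [] ∈ v := by
  apply PySem.List.pyGetD_mem
  have := h.1
  simp [PySem.Raise.InRange]
  omega

theorem pvShape_vset {v : List (List Int)} {n y x : Int} (h : pvShape v n)
    (hy0 : 0 ≤ y) (hy1 : y < n) (val : Int) : pvShape (pvVset v y x val) n := by
  unfold pvVset
  refine ⟨by rw [pv_length_pySetD]; exact h.1, ?_⟩
  intro row hr
  rcases pv_mem_pySetD hr with h1 | h1
  · exact h.2 _ h1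
  · subst h1
    rw [pv_length_pySetD]
    exact h.2 _ (pv_row_mem h hy0 hy1)

theorem pvVget_vset {v : List (List Int)} {n a b y x : Int} (h : pvShape v n)
    (ha0 : 0 ≤ a) (ha1 : a < n) (hb0 : 0 ≤ b) (hb1 : b < n)
    (hy0 : 0 ≤ y) (hy1 : y < n) (hx0 : 0 ≤ x) (hx1 : x < n) (val : Int) :
    pvVget (pvVset v a b val) y x = if y = a ∧ x = b then val else pvVget v y x := by
  have hA : a = ((a.toNat : Nat) : Int) := by omega
  have hB : b = ((b.toNat : Nat) : Int) := by omega
  have hY : y = ((y.toNat : Nat) : Int) := by omega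
  have hX : x = ((x.toNat : Nat) : Int) := by omega
  have hrowlen : (PySem.List.pyGetD v ((a.toNat : Nat) : Int) []).length = n.toNat := by
    rw [← hA]; exact h.2 _ (pv_row_mem h ha0 ha1)
  have hvlen : a.toNat < v.length := by have := h.1; omega
  unfold pvVget pvVset
  rw [hA, hY, hX, hB]
  rw [PySem.List.pyGetD_pySetD_natCast v a.toNat y.toNat _ _ hvlen]
  by_cases hya : y.toNat = a.toNat
  · rw [if_pos hya]
    rw [PySem.List.pyGetD_pySetD_natCast _ b.toNat x.toNat _ _ (by rw [hrowlen]; omega)]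
    by_cases hxb : x.toNat = b.toNat
    · rw [if_pos hxb, if_pos ⟨by omega, by omega⟩]
    · rw [if_neg hxb, if_neg (by omega), hya]
  · rw [if_neg hya, if_neg (by omega)]

theorem pvVget_replicate {n y x : Int}
    (hy0 : 0 ≤ y) (hy1 : y < n) (hx0 : 0 ≤ x) (hx1 : x < n) :
    pvVget (List.replicate n.toNat (List.replicate n.toNat (-1))) y x = -1 := by
  unfold pvVget
  rw [PySem.List.pyGetD_eq_getElem _ _ hy0 (by simp; omega)]
  simp only [List.getElem_replicate]
  rw [PySem.List.pyGetD_eq_getElem _ _ hx0 (by simp; omega)]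
  simp

theorem pvShape_replicate (n : Int) :
    pvShape (List.replicate n.toNat (List.replicate n.toNat (-1))) n := by
  constructor
  · simp
  · intro row hr
    simp only [List.mem_replicate] at hr
    rw [hr.2]; simp

theorem pvVget_lb {v : List (List Int)} (hlb : ∀ row ∈ v, ∀ e ∈ row, -1 ≤ e) (y x : Int) :
    -1 ≤ pvVget v y x := by
  unfold pvVget
  by_cases h1 : PySem.Raise.InRange v.length y
  · have hrow := PySem.List.pyGetD_mem v ([]) h1
    by_cases h2 : PySem.Raise.InRange (PySem.List.pyGetD v y []).length x
    · exact hlb _ hrow _ (PySem.List.pyGetD_mem _ 0 h2)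
    · rw [PySem.List.pyGetD_of_none]
      · omega
      · rw [PySem.List.pyGet?_eq_none_iff]; exact h2
  · rw [show PySem.List.pyGetD v y [] = [] from by
        rw [PySem.List.pyGetD_of_none]; rw [PySem.List.pyGet?_eq_none_iff]; exact h1]
    rw [PySem.List.pyGetD_of_none]
    · omega
    · rw [PySem.List.pyGet?_eq_none_iff]; simp [PySem.Raise.InRange]

theorem pv_lb_vset {v : List (List Int)} {val : Int}
    (hlb : ∀ row ∈ v, ∀ e ∈ row, -1 ≤ e) (hval : -1 ≤ val) (y x : Int) :
    ∀ row ∈ pvVset v y x val, ∀ e ∈ row, -1 ≤ e := by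
  intro row hr e he
  rcases pv_mem_pySetD hr with h1 | h1
  · exact hlb _ h1 _ he
  · subst h1
    rcases pv_mem_pySetD he with h2 | h2
    · by_cases h3 : PySem.Raise.InRange v.length y
      · exact hlb _ (PySem.List.pyGetD_mem v [] h3) _ h2
      · rw [show PySem.List.pyGetD v y [] = [] from by
            rw [PySem.List.pyGetD_of_none]; rw [PySem.List.pyGet?_eq_none_iff]; exact h3] at h2
        simp at h2
    · omega

-- ## phase 1: the two BFS loops compute the same visited grid and queue

theorem pv_stepAB (depart : List (List Int)) (n lo y x : Int)
    (st : List (List Int) × List (Int × Int × Int) × List (Int × Int)) (i : Int) :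
    ((pvStepA depart n lo y x st i).1, (pvStepA depart n lo y x st i).2.2)
      = pvStepB depart n lo y x (st.1, st.2.2) i := by
  obtain ⟨v, p, q⟩ := st
  simp only [pvStepA, pvStepB]
  split_ifs <;> simp_all

theorem pv_foldAB (depart : List (List Int)) (n lo y x : Int) :
    ∀ (l : List Int) (st : List (List Int) × List (Int × Int × Int) × List (Int × Int)),
    ((l.foldl (pvStepA depart n lo y x) st).1, (l.foldl (pvStepA depart n lo y x) st).2.2)
      = l.foldl (pvStepB depart n lo y x) (st.1, st.2.2) := by
  intro l
  induction l with
  | nil => intro st; rfl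
  | cons i t ih =>
    intro st
    simp only [List.foldl_cons]
    rw [ih, pv_stepAB]

theorem pv_loopAB (depart : List (List Int)) (n lo : Int) :
    ∀ (fuel : Nat) (st : List (List Int) × List (Int × Int × Int) × List (Int × Int)),
    (pvLoopA depart n lo fuel st).1 = pvLoopB depart n lo fuel (st.1, st.2.2) := by
  intro fuel
  induction fuel with
  | zero => intro st; rfl
  | succ f ih =>
    intro st
    obtain ⟨v, p, q⟩ := st
    match q with
    | [] => rfl
    | (y, x) :: qt =>
      show (pvLoopA depart n lo f _).1 = pvLoopB depart n lo f _
      rw [ih]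
      rw [pv_foldAB]

-- ## phase 2: loop invariant — potential is exactly the visited customer cells

def pvInv (depart : List (List Int)) (n : Int)
    (st : List (List Int) × List (Int × Int × Int) × List (Int × Int)) : Prop :=
  pvShape st.1 n ∧
  (∀ row ∈ st.1, ∀ e ∈ row, -1 ≤ e) ∧
  (∀ c ∈ st.2.2, 0 ≤ c.1 ∧ c.1 < n ∧ 0 ≤ c.2 ∧ c.2 < n) ∧
  (∀ y x : Int, 0 ≤ y → y < n → 0 ≤ x → x < n → pvVget depart y x ≠ 0 →
      (pvVget st.1 y x ≠ -1 ↔ (pvVget st.1 y x, y, x) ∈ st.2.1)) ∧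
  (∀ t ∈ st.2.1, 0 ≤ t.2.1 ∧ t.2.1 < n ∧ 0 ≤ t.2.2 ∧ t.2.2 < n ∧
      pvVget depart t.2.1 t.2.2 ≠ 0 ∧ pvVget st.1 t.2.1 t.2.2 = t.1 ∧ t.1 ≠ -1)

theorem pv_stepA_inv {depart : List (List Int)} {n : Int} (lo y x : Int)
    {st : List (List Int) × List (Int × Int × Int) × List (Int × Int)} (i : Int)
    (h : pvInv depart n st) : pvInv depart n (pvStepA depart n lo y x st i) := by
  obtain ⟨v, p, q⟩ := st
  obtain ⟨hsh, hlb, hq, hiff, helem⟩ := h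
  dsimp only at hsh hlb hq hiff helem
  simp only [pvStepA]
  split
  case isFalse => exact ⟨hsh, hlb, hq, hiff, helem⟩
  case isTrue hg =>
  obtain ⟨hnx0, hnx1, hny0, hny1, hcw, hvis⟩ := hg
  set nx := x + PySem.List.pyGetD pvDxL i 0 with hnxdef
  set ny := y + PySem.List.pyGetD pvDyL i 0 with hnydef
  set d := pvVget v y x + 1 with hddef
  have hd0 : 0 ≤ d := by have := pvVget_lb hlb y x; omega
  have hdne : d ≠ -1 := by omega
  have hsh' : pvShape (pvVset v ny nx d) n := pvShape_vset hsh hny0 hny1 d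
  have hlb' := pv_lb_vset (val := d) hlb (by omega) ny nx
  refine ⟨hsh', hlb', ?_, ?_, ?_⟩
  · -- queue cells in range
    intro c hc
    dsimp only at hc
    split_ifs at hc
    · exact hq c hc
    · rcases List.mem_append.mp hc with h1 | h1
      · exact hq c h1
      · simp at h1; subst h1; exact ⟨hny0, hny1, hnx0, hnx1⟩
  · -- membership iff
    intro y' x' hy0 hy1 hx0 hx1 hcell
    dsimp only
    have hvv := pvVget_vset hsh hny0 hny1 hnx0 hnx1 hy0 hy1 hx0 hx1 d
    by_cases hc : y' = ny ∧ x' = nx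
    · rw [hvv, if_pos hc]
      have hpnew : (if pvVget depart ny nx ≠ 0 then p ++ [(d, ny, nx)] else p)
          = p ++ [(d, ny, nx)] := by
        rw [if_pos (by rw [← hc.1, ← hc.2]; exact hcell)]
      rw [hpnew]
      constructor
      · intro _
        simp [hc.1, hc.2]
      · intro _; exact hdne
    · rw [hvv, if_neg hc]
      have hold := hiff y' x' hy0 hy1 hx0 hx1 hcell
      constructor
      · intro hne
        have := hold.mp hne
        split_ifs
        · exact List.mem_append.mpr (Or.inl this)
        · exact this
      · intro hmem
        have hmem' : (pvVget v y' x', y', x') ∈ p := by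
          split_ifs at hmem
          · rcases List.mem_append.mp hmem with h1 | h1
            · exact h1
            · simp at h1
              exact absurd ⟨h1.2.1, h1.2.2⟩ hc
          · exact hmem
        exact hold.mpr hmem'
  · -- elements of potential are well-formed
    intro t ht
    dsimp only at ht ⊢
    have hvvt : ∀ (hy0 : 0 ≤ t.2.1) (hy1 : t.2.1 < n) (hx0 : 0 ≤ t.2.2) (hx1 : t.2.2 < n),
        pvVget (pvVset v ny nx d) t.2.1 t.2.2
          = if t.2.1 = ny ∧ t.2.2 = nx then d else pvVget v t.2.1 t.2.2 :=
      fun hy0 hy1 hx0 hx1 => pvVget_vset hsh hny0 hny1 hnx0 hnx1 hy0 hy1 hx0 hx1 d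
    have hcase : t ∈ p ∨ (pvVget depart ny nx ≠ 0 ∧ t = (d, ny, nx)) := by
      split_ifs at ht with hcny
      · rcases List.mem_append.mp ht with h1 | h1
        · exact Or.inl h1
        · simp at h1; exact Or.inr ⟨hcny, by rcases t with ⟨a, b, c⟩; simp_all⟩
      · exact Or.inl ht
    rcases hcase with h1 | ⟨hcny, h1⟩
    · obtain ⟨e1, e2, e3, e4, e5, e6, e7⟩ := helem t h1
      refine ⟨e1, e2, e3, e4, e5, ?_, e7⟩
      rw [hvvt e1 e2 e3 e4]
      rw [if_neg ?_]
      · exact e6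
      · rintro ⟨hc1, hc2⟩
        rw [hc1, hc2] at e6
        rw [hvis] at e6
        exact e7 e6.symm
    · subst h1
      refine ⟨hny0, hny1, hnx0, hnx1, hcny, ?_, hdne⟩
      rw [hvvt hny0 hny1 hnx0 hnx1, if_pos ⟨rfl, rfl⟩]

theorem pv_foldA_inv {depart : List (List Int)} {n : Int} (lo y x : Int) :
    ∀ (l : List Int) (st : List (List Int) × List (Int × Int × Int) × List (Int × Int)),
    pvInv depart n st → pvInv depart n (l.foldl (pvStepA depart n lo y x) st) := by
  intro l
  induction l with
  | nil => intro st h; exact h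
  | cons i t ih =>
    intro st h
    simp only [List.foldl_cons]
    exact ih _ (pv_stepA_inv lo y x i h)

theorem pv_loopA_inv {depart : List (List Int)} {n lo : Int} :
    ∀ (fuel : Nat) (st : List (List Int) × List (Int × Int × Int) × List (Int × Int)),
    pvInv depart n st →
    pvInv depart n ((pvLoopA depart n lo fuel st).1, (pvLoopA depart n lo fuel st).2, []) := by
  intro fuel
  induction fuel with
  | zero =>
    intro st h
    exact ⟨h.1, h.2.1, by simp, h.2.2.2.1, h.2.2.2.2⟩
  | succ f ih =>
    intro st h
    obtain ⟨v, p, q⟩ := st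
    match q with
    | [] => exact ⟨h.1, h.2.1, by simp, h.2.2.2.1, h.2.2.2.2⟩
    | (y, x) :: qt =>
      show pvInv depart n ((pvLoopA depart n lo f _).1, _, [])
      apply ih
      apply pv_foldA_inv
      obtain ⟨hsh, hlb, hq, hiff, helem⟩ := h
      exact ⟨hsh, hlb, fun c hc => hq c (List.mem_cons_of_mem _ hc), hiff, helem⟩

theorem pv_inv_init {depart : List (List Int)} {n : Int} {cur : Int × Int}
    (h1 : 0 ≤ cur.1) (h2 : cur.1 < n) (h3 : 0 ≤ cur.2) (h4 : cur.2 < n)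
    (hstart : pvVget depart cur.1 cur.2 = 0) :
    pvInv depart n
      (pvVset (List.replicate n.toNat (List.replicate n.toNat (-1))) cur.1 cur.2 0,
       [], [cur]) := by
  have hshr := pvShape_replicate n
  refine ⟨pvShape_vset hshr h1 h2 0, ?_, ?_, ?_, by simp⟩
  · apply pv_lb_vset ?_ (by omega)
    intro row hr e he
    simp only [List.mem_replicate] at hr
    rw [hr.2] at he
    simp only [List.mem_replicate] at he
    omega
  · intro c hc
    simp at hc
    subst hc
    exact ⟨h1, h2, h3, h4⟩
  · intro y x hy0 hy1 hx0 hx1 hcell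
    rw [pvVget_vset hshr h1 h2 h3 h4 hy0 hy1 hx0 hx1 0]
    simp only [List.not_mem_nil, iff_false, Decidable.not_not]
    split_ifs with hc
    · exfalso
      rw [hc.1, hc.2] at hcell
      exact hcell hstart
    · exact pvVget_replicate hy0 hy1 hx0 hx1

-- ## phase 3: the row-major scan selects exactly sorted(potential)[0]

def pvMin2 (a c : Int × Int × Int) : Int × Int × Int := if c.1 < a.1 then c else a

def pvCandF (depart v : List (List Int)) (yx : Int × Int) : Option (Int × Int × Int) :=
  if pvVget v yx.1 yx.2 ≠ -1 ∧ pvVget depart yx.1 yx.2 ≠ 0 then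
    some (pvVget v yx.1 yx.2, yx.1, yx.2)
  else none

def pvPosLT (a c : Int × Int × Int) : Prop :=
  a.2.1 < c.2.1 ∨ (a.2.1 = c.2.1 ∧ a.2.2 < c.2.2)

theorem pvKey_le_iff (a c : Int × Int × Int) :
    pvKey a ≤ pvKey c ↔
      (a.1 < c.1 ∨ (a.1 = c.1 ∧ (a.2.1 < c.2.1 ∨ (a.2.1 = c.2.1 ∧ a.2.2 ≤ c.2.2)))) := by
  simp [pvKey, Prod.Lex.toLex_le_toLex]

theorem pvKey_inj {a c : Int × Int × Int} (h : pvKey a = pvKey c) : a = c := by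
  simp only [pvKey, toLex_inj, Prod.mk.injEq] at h
  obtain ⟨h1, h2, h3⟩ := h
  exact Prod.ext h1 (Prod.ext h2 h3)

theorem pv_foldl_nested {β : Type} (g : β → (Int × Int) → β) (ys xs : List Int) (b0 : β) :
    ys.foldl (fun b y => xs.foldl (fun b x => g b (y, x)) b) b0
      = (ys.flatMap (fun y => xs.map (fun x => (y, x)))).foldl g b0 := by
  induction ys generalizing b0 with
  | nil => rfl
  | cons y t ih => simp [List.foldl_append, List.foldl_map, ih]

theorem pv_scan_some (depart v : List (List Int)) :
    ∀ (L : List (Int × Int)) (a : Int × Int × Int),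
    L.foldl (pvScanStep depart v) (some a)
      = some ((L.filterMap (pvCandF depart v)).foldl pvMin2 a) := by
  intro L
  induction L with
  | nil => intro a; rfl
  | cons yx t ih =>
    intro a
    simp only [List.foldl_cons, List.filterMap_cons]
    by_cases hc : pvVget v yx.1 yx.2 ≠ -1 ∧ pvVget depart yx.1 yx.2 ≠ 0
    · rw [show pvScanStep depart v (some a) yx
          = some (pvMin2 a (pvVget v yx.1 yx.2, yx.1, yx.2)) from by
        simp only [pvScanStep, pvMin2, if_pos hc]
        split_ifs <;> rfl]
      rw [show pvCandF depart v yx = some (pvVget v yx.1 yx.2, yx.1, yx.2) from by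
        simp only [pvCandF, if_pos hc]]
      rw [ih]
      rfl
    · rw [show pvScanStep depart v (some a) yx = some a from by
        simp only [pvScanStep, if_neg hc]]
      rw [show pvCandF depart v yx = none from by simp only [pvCandF, if_neg hc]]
      rw [ih]

theorem pv_scan_none (depart v : List (List Int)) :
    ∀ (L : List (Int × Int)),
    L.foldl (pvScanStep depart v) none
      = (match L.filterMap (pvCandF depart v) with
         | [] => none
         | c :: cs => some (cs.foldl pvMin2 c)) := by
  intro L
  induction L with
  | nil => rfl
  | cons yx t ih =>
    simp only [List.foldl_cons, List.filterMap_cons]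
    by_cases hc : pvVget v yx.1 yx.2 ≠ -1 ∧ pvVget depart yx.1 yx.2 ≠ 0
    · rw [show pvScanStep depart v none yx
          = some (pvVget v yx.1 yx.2, yx.1, yx.2) from by
        simp only [pvScanStep, if_pos hc]]
      rw [show pvCandF depart v yx = some (pvVget v yx.1 yx.2, yx.1, yx.2) from by
        simp only [pvCandF, if_pos hc]]
      rw [pv_scan_some]
    · rw [show pvScanStep depart v none yx = none from by
        simp only [pvScanStep, if_neg hc]]
      rw [show pvCandF depart v yx = none from by simp only [pvCandF, if_neg hc]]
      exact ih

theorem pv_foldl_min2 :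
    ∀ (cs : List (Int × Int × Int)) (a : Int × Int × Int),
    (∀ c ∈ cs, pvPosLT a c) → cs.Pairwise pvPosLT →
    (cs.foldl pvMin2 a = a ∨ cs.foldl pvMin2 a ∈ cs) ∧
    pvKey (cs.foldl pvMin2 a) ≤ pvKey a ∧
    (∀ c ∈ cs, pvKey (cs.foldl pvMin2 a) ≤ pvKey c) := by
  intro cs
  induction cs with
  | nil => intro a _ _; exact ⟨Or.inl rfl, le_refl _, by simp⟩
  | cons c t ih =>
    intro a ha hp
    have hpt := List.Pairwise.of_cons hp
    have hct : ∀ c' ∈ t, pvPosLT c c' := fun c' hc' => List.rel_of_pairwise_cons hp hc'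
    have hat : ∀ c' ∈ t, pvPosLT (pvMin2 a c) c' := by
      intro c' hc'
      unfold pvMin2
      split_ifs
      · exact hct c' hc'
      · exact ha c' (List.mem_cons_of_mem _ hc')
    obtain ⟨hmem, hle, hall⟩ := ih (pvMin2 a c) hat hpt
    have hfold : (c :: t).foldl pvMin2 a = t.foldl pvMin2 (pvMin2 a c) := rfl
    have hkey_ac_a : pvKey (pvMin2 a c) ≤ pvKey a := by
      unfold pvMin2
      split_ifs with hlt
      · rw [pvKey_le_iff]; left; exact hlt
      · exact le_refl _
    have hkey_ac_c : pvKey (pvMin2 a c) ≤ pvKey c := by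
      unfold pvMin2
      split_ifs with hlt
      · exact le_refl _
      · rw [pvKey_le_iff]
        have hpos := ha c (List.mem_cons_self)
        unfold pvPosLT at hpos
        omega
    refine ⟨?_, ?_, ?_⟩
    · rw [hfold]
      rcases hmem with h1 | h1
      · rw [h1]
        unfold pvMin2
        split_ifs
        · exact Or.inr List.mem_cons_self
        · exact Or.inl rfl
      · exact Or.inr (List.mem_cons_of_mem _ h1)
    · rw [hfold]; exact le_trans hle hkey_ac_a
    · intro c' hc'
      rw [hfold]
      rcases List.mem_cons.mp hc' with h1 | h1
      · rw [h1]; exact le_trans hle hkey_ac_c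
      · exact hall c' h1

theorem pv_pairwise_flatMap (ys xs : List Int)
    (hys : ys.Pairwise (· < ·)) (hxs : xs.Pairwise (· < ·)) :
    (ys.flatMap (fun y => xs.map (fun x => (y, x)))).Pairwise
      (fun p q : Int × Int => p.1 < q.1 ∨ (p.1 = q.1 ∧ p.2 < q.2)) := by
  induction ys with
  | nil => simp
  | cons y t ih =>
    simp only [List.flatMap_cons, List.pairwise_append]
    refine ⟨?_, ih (List.Pairwise.of_cons hys), ?_⟩
    · rw [List.pairwise_map]
      exact hxs.imp (fun h => Or.inr ⟨rfl, h⟩)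
    · intro p hp q hq
      rcases List.mem_map.mp hp with ⟨x1, _, hpx⟩
      rcases List.mem_flatMap.mp hq with ⟨y2, hy2, hq2⟩
      rcases List.mem_map.mp hq2 with ⟨x2, _, hqx⟩
      left
      rw [← hpx, ← hqx]
      exact List.rel_of_pairwise_cons hys hy2

theorem pvVget_eq_bind (depart : List (List Int)) (y x : Int) :
    pvVget depart y x
      = ((PySem.List.pyGet? depart y).bind (fun row => PySem.List.pyGet? row x)).getD 0 := by
  unfold pvVget
  cases h1 : PySem.List.pyGet? depart y with
  | none =>
    rw [PySem.List.pyGetD_of_none _ _ _ h1]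
    cases h2 : PySem.List.pyGet? ([] : List Int) x with
    | none => simp [PySem.List.pyGetD_of_none _ _ _ h2]
    | some v =>
      rw [show PySem.List.pyGet? ([] : List Int) x = none from by
        rw [PySem.List.pyGet?_eq_none_iff]; simp [PySem.Raise.InRange]] at h2
      cases h2
  | some row =>
    have : PySem.List.pyGetD depart y [] = row := by
      simp [PySem.List.pyGetD, PySem.List.pyGet?] at h1 ⊢
      cases hk : PySem.List.pyIdx? depart.length y <;> rw [hk] at h1 <;> simp_all
    rw [this]
    cases h2 : PySem.List.pyGet? row x with
    | none => rw [PySem.List.pyGetD_of_none _ _ _ h2]; simp [h2]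
    | some v =>
      have : PySem.List.pyGetD row x 0 = v := by
        simp [PySem.List.pyGetD, PySem.List.pyGet?] at h2 ⊢
        cases hk : PySem.List.pyIdx? row.length x <;> rw [hk] at h2 <;> simp_all
      simp [this, h2]

theorem pv_memL (n : Int) (y x : Int) :
    (y, x) ∈ (PySem.List.pyRange 0 n 1).flatMap
        (fun y => (PySem.List.pyRange 0 n 1).map (fun x => (y, x)))
      ↔ (0 ≤ y ∧ y < n ∧ 0 ≤ x ∧ x < n) := by
  simp only [List.mem_flatMap, List.mem_map, PySem.List.mem_pyRange_one, Prod.mk.injEq]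
  constructor
  · rintro ⟨y', hy', x', hx', he1, he2⟩
    subst he1; subst he2
    exact ⟨hy'.1, hy'.2, hx'.1, hx'.2⟩
  · rintro ⟨hy0, hy1, hx0, hx1⟩
    exact ⟨y, ⟨hy0, hy1⟩, x, ⟨hx0, hx1⟩, rfl, rfl⟩

-- ===== VERDICT (by name: the statement is the Claim_ definition above) =====
theorem find_customer_spec : Claim_equal_find_customer := by
  intro depart n cur_taxi left_oil hdom hpre
  unfold Spec_find_customer
  simp only [find_customer, find_customer_alt]
  by_cases h0 : pvVget depart cur_taxi.1 cur_taxi.2 ≠ 0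
  · rw [if_pos h0, if_pos h0]
  · rw [if_neg h0, if_neg h0]
    have h0' : pvVget depart cur_taxi.1 cur_taxi.2 = 0 := not_ne_iff.mp h0
    have hwf : (depart.length : Int) = n ∧ (∀ row ∈ depart, (row.length : Int) = n) ∧
        0 ≤ cur_taxi.1 ∧ cur_taxi.1 < n ∧ 0 ≤ cur_taxi.2 ∧ cur_taxi.2 < n := by
      rcases hpre with he | hwf
      · rw [← pvVget_eq_bind] at he
        exact absurd h0' he
      · exact hwf
    obtain ⟨hlen, hrows, h1, h2, h3, h4⟩ := hwf
    set v0 := pvVset (List.replicate n.toNat (List.replicate n.toNat (-1)))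
      cur_taxi.1 cur_taxi.2 0 with hv0
    set fuel := n.toNat * n.toNat + 1 with hfuel
    set r := pvLoopA depart n left_oil fuel (v0, [], [cur_taxi]) with hr
    have hloop : r.1 = pvLoopB depart n left_oil fuel (v0, [cur_taxi]) :=
      pv_loopAB depart n left_oil fuel (v0, [], [cur_taxi])
    rw [← hloop]
    have hInv := pv_loopA_inv (lo := left_oil) fuel (v0, [], [cur_taxi])
      (pv_inv_init h1 h2 h3 h4 h0')
    rw [← hr] at hInv
    obtain ⟨hsh, hlb, -, hiff, helem⟩ := hInv
    dsimp only at hsh hlb hiff helem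
    rw [pv_foldl_nested (pvScanStep depart r.1), pv_scan_none]
    set L := (PySem.List.pyRange 0 n 1).flatMap
        (fun y => (PySem.List.pyRange 0 n 1).map (fun x => (y, x))) with hL
    set C := L.filterMap (pvCandF depart r.1) with hCdef
    have hC : ∀ c, c ∈ C ↔ c ∈ r.2 := by
      intro c
      constructor
      · intro hc
        rcases List.mem_filterMap.mp hc with ⟨yx, hyxL, hf⟩
        obtain ⟨yy, xx⟩ := yx
        simp only [pvCandF] at hf
        split_ifs at hf with hcond
        · have hrange := (pv_memL n yy xx).mp hyxL
          have := (hiff yy xx hrange.1 hrange.2.1 hrange.2.2.1 hrange.2.2.2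
            hcond.2).mp hcond.1
          exact (Option.some.inj hf) ▸ this
      · intro hc
        obtain ⟨e1, e2, e3, e4, e5, e6, e7⟩ := helem c hc
        apply List.mem_filterMap.mpr
        refine ⟨(c.2.1, c.2.2), (pv_memL n c.2.1 c.2.2).mpr ⟨e1, e2, e3, e4⟩, ?_⟩
        simp only [pvCandF]
        rw [if_pos ⟨by rw [e6]; exact e7, e5⟩]
        rw [e6]
    have hPairC : C.Pairwise pvPosLT := by
      apply List.pairwise_filterMap.mpr
      refine List.Pairwise.imp ?_
        (pv_pairwise_flatMap (PySem.List.pyRange 0 n 1) (PySem.List.pyRange 0 n 1)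
          (PySem.List.pairwise_lt_pyRange_one 0 n) (PySem.List.pairwise_lt_pyRange_one 0 n))
      intro a a' hR b hb b' hb'
      simp only [pvCandF] at hb hb'
      split_ifs at hb hb'
      · rw [← Option.some.inj hb, ← Option.some.inj hb']
        exact hR
    by_cases hpf : r.2 = []
    · rw [if_pos hpf]
      have hCnil : C = [] := by
        apply List.eq_nil_iff_forall_not_mem.mpr
        intro c hc
        have := (hC c).mp hc
        rw [hpf] at this
        simp at this
      rw [hCnil]
    · rw [if_neg hpf]
      rcases hsort : PySem.List.sorted r.2 pvKey with _ | ⟨m, tl⟩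
      · exact absurd ((PySem.List.sorted_eq_nil_iff r.2 pvKey false).mp hsort) hpf
      · rw [PySem.List.pyGetD_zero_cons]
        have hmmem : m ∈ r.2 :=
          (PySem.List.mem_sorted r.2 pvKey false m).mp (hsort ▸ List.mem_cons_self)
        have hmmin : ∀ t' ∈ r.2, pvKey m ≤ pvKey t' :=
          PySem.List.key_head_sorted_le r.2 pvKey hsort
        rcases hc0 : C with _ | ⟨c0, cs⟩
        · exact absurd ((hC m).mpr hmmem) (by rw [hc0]; simp)
        · show m = cs.foldl pvMin2 c0
          have hPairC' : (c0 :: cs).Pairwise pvPosLT := hc0 ▸ hPairC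
          have hspec := pv_foldl_min2 cs c0
            (fun c' hc' => List.rel_of_pairwise_cons hPairC' hc')
            (List.Pairwise.of_cons hPairC')
          set rB := cs.foldl pvMin2 c0 with hrB
          have hrBC : rB ∈ C := by
            rw [hc0]
            rcases hspec.1 with hh | hh
            · rw [hh]; exact List.mem_cons_self
            · exact List.mem_cons_of_mem _ hh
          have hrB_le : ∀ c ∈ C, pvKey rB ≤ pvKey c := by
            intro c hcc
            rw [hc0] at hcc
            rcases List.mem_cons.mp hcc with hh | hh
            · rw [hh]; exact hspec.2.1
            · exact hspec.2.2 c hh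
          have hkey : pvKey m = pvKey rB :=
            le_antisymm (hmmin rB ((hC rB).mp hrBC)) (hrB_le m ((hC m).mpr hmmem))
          exact pvKey_inj hkey
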